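-- pv_equiv track=rewrite | github.com/clonn/obsidian_plugin_LLM-Wiki | tools/lint/lint.py | _format_grouped
-- ===== SOURCE A (Python) =====
-- from collections import defaultdict
--
-- ALL_CATEGORIES = [
--     "EMPTY",
--     "FRONTMATTER",
--     "DANGLING_LINK",
--     "DUPLICATE_TITLE",
--     "ORPHAN_RAW",
--     "UNLINKED_MENTION",
--     "STALE",
--     "INDEX_DRIFT",
-- ]
--
-- def _format_grouped(issues: list[tuple[str, str]]) -> str:
--     """Format issues grouped by category."""
--     grouped: dict[str, list[str]] = defaultdict(list)
--     for cat, detail in issues: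
--         grouped[cat].append(detail)
--
--     cat_count = len(grouped)
--     total = len(issues)
--     lines = [f"lint: FAIL ({total} issues across {cat_count} categories)"]
--
--     for cat in ALL_CATEGORIES:
--         if cat not in grouped:
--             continue
--         items = grouped[cat]
--         lines.append(f"  {cat} ({len(items)}):")
--         for item in items:
--             lines.append(f"    - {item}")
--
--     return "\n".join(lines)
-- ===== SOURCE B (Python) =====
-- ALL_CATEGORIES = [
--     "EMPTY",
--     "FRONTMATTER",
--     "DANGLING_LINK",
--     "DUPLICATE_TITLE",
--     "ORPHAN_RAW",
--     "UNLINKED_MENTION",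
--     "STALE",
--     "INDEX_DRIFT",
-- ]
--
-- def _format_grouped(issues: list[tuple[str, str]]) -> str:
--     """Format issues grouped by category (single string accumulator, no dict)."""
--     total = len(issues)
--     cat_count = len({cat for cat, _ in issues})
--     out = f"lint: FAIL ({total} issues across {cat_count} categories)"
--     for cat in ALL_CATEGORIES:
--         details = [d for c, d in issues if c == cat]
--         if details:
--             out += f"\n  {cat} ({len(details)}):"
--             for d in details:
--                 out += f"\n    - {d}"
--     return out
-- ===== Notes on version B (the rewrite author's own statement) =====
-- stated objective: simpler
-- what changed: Replaces the defaultdict grouping pass and the joined lines list with a single string accumulator: the distinct-category count comes from a set comprehension over the category column and each category's details are gathered by one comprehension inside the output loop.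
import Mathlib
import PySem

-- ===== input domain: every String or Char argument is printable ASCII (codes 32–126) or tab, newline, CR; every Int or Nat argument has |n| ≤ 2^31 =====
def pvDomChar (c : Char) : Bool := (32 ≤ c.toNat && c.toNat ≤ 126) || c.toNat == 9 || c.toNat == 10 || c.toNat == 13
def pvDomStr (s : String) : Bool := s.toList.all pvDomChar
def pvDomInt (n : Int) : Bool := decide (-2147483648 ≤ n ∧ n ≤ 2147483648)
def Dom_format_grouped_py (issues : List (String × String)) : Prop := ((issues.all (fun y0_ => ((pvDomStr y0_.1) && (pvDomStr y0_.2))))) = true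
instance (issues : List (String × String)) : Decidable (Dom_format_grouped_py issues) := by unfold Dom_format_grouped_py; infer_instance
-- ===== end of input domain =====

-- B replaces A's defaultdict grouping pass and joined lines list with a single string
-- accumulator and a per-category filter inside the output loop; objective: simpler.

def allCategories : List String :=
  ["EMPTY", "FRONTMATTER", "DANGLING_LINK", "DUPLICATE_TITLE",
   "ORPHAN_RAW", "UNLINKED_MENTION", "STALE", "INDEX_DRIFT"]

-- ===== PORT A =====
def format_grouped_py (issues : List (String × String)) : String :=
  let grouped : PySem.Dict String (List String) :=
    issues.foldl (fun d p => d.modify p.1 [] (· ++ [p.2])) PySem.Dict.empty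
  let catCount := grouped.size
  let total := issues.length
  let lines : List String :=
    ["lint: FAIL (" ++ PySem.Int.toStr (total : Int) ++ " issues across "
      ++ PySem.Int.toStr (catCount : Int) ++ " categories)"]
  let lines := allCategories.foldl (fun lines cat =>
    if grouped.contains cat then
      let items := grouped.getD cat []
      let lines := lines ++ ["  " ++ cat ++ " (" ++ PySem.Int.toStr (items.length : Int) ++ "):"]
      items.foldl (fun lines item => lines ++ ["    - " ++ item]) lines
    else lines) lines
  PySem.Str.join "\n" lines

-- ===== PORT B =====
def format_grouped_py_alt (issues : List (String × String)) : String :=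
  let total := issues.length
  let catCount := (PySem.Set.ofList (issues.map Prod.fst)).length
  let header := "lint: FAIL (" ++ PySem.Int.toStr (total : Int) ++ " issues across "
      ++ PySem.Int.toStr (catCount : Int) ++ " categories)"
  allCategories.foldl (fun out cat =>
    let details := (issues.filter (fun p => p.1 == cat)).map Prod.snd
    if details.isEmpty then out
    else details.foldl (fun o d => o ++ "\n    - " ++ d)
      (out ++ "\n  " ++ cat ++ " (" ++ PySem.Int.toStr (details.length : Int) ++ "):")) header

-- ===== PRECONDITION & SPEC =====
def Spec_format_grouped_py (issues : List (String × String)) (out : String) : Prop := out = format_grouped_py_alt issues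
instance (issues : List (String × String)) (out : String) : Decidable (Spec_format_grouped_py issues out) := by unfold Spec_format_grouped_py; infer_instance

-- ===== CLAIM (what is proved, stated in full; the proofs are below) =====
def Claim_equal_format_grouped_py : Prop := ∀ (issues : List (String × String)), Dom_format_grouped_py issues → Spec_format_grouped_py issues (format_grouped_py issues)

-- ===== LEMMAS AND PROOFS =====

-- the block of output lines contributed by one category
def lineFor (issues : List (String × String)) (cat : String) : List String :=
  let details := (issues.filter (fun p => p.1 == cat)).map Prod.snd
  if details.isEmpty then []
  else ("  " ++ cat ++ " (" ++ PySem.Int.toStr (details.length : Int) ++ "):")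
        :: details.map (fun d => "    - " ++ d)

lemma foldl_app_singleton {α : Type} (g : α → String) (l : List α) (init : List String) :
    l.foldl (fun acc x => acc ++ [g x]) init = init ++ l.map g := by
  induction l generalizing init with
  | nil => simp
  | cons x l ih => simp [ih]

lemma foldl_append_flat {α : Type} (F : α → List String) (l : List α) (init : List String) :
    l.foldl (fun acc x => acc ++ F x) init = init ++ l.flatMap F := by
  induction l generalizing init with
  | nil => simp
  | cons x l ih => simp [ih]

lemma chars_join_glue (sep a b : List Char) (L : List (List Char)) :
    PySem.Chars.join sep ((a ++ sep ++ b) :: L) = a ++ sep ++ PySem.Chars.join sep (b :: L) := by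
  cases L with
  | nil => simp [PySem.Chars.join_singleton]
  | cons c L => rw [PySem.Chars.join_cons_cons, PySem.Chars.join_cons_cons]; simp [List.append_assoc]

lemma str_join_cons (h : String) (ls : List String) :
    PySem.Str.join "\n" (h :: ls) = ls.foldl (fun o s => o ++ "\n" ++ s) h := by
  induction ls generalizing h with
  | nil =>
    apply String.toList_inj.mp
    rw [PySem.Str.toList_join]
    simp [PySem.Chars.join_singleton]
  | cons s t ih =>
    have glue : PySem.Str.join "\n" (h :: s :: t) = PySem.Str.join "\n" ((h ++ "\n" ++ s) :: t) := by
      apply String.toList_inj.mp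
      rw [PySem.Str.toList_join, PySem.Str.toList_join]
      simp only [List.map_cons, String.toList_append]
      rw [PySem.Chars.join_cons_cons, chars_join_glue]
    rw [glue, ih]
    simp

lemma keys_grouped (issues : List (String × String)) :
    (issues.foldl (fun d p => d.modify p.1 [] (· ++ [p.2]))
      (PySem.Dict.empty : PySem.Dict String (List String))).keys
      = PySem.Set.ofList (issues.map Prod.fst) := by
  have h := PySem.Dict.keys_foldl_modify_key issues Prod.fst ([] : List String)
      (fun _ p => (· ++ [p.2])) PySem.Dict.empty
  simpa [PySem.Dict.keys, PySem.Dict.empty, PySem.Set.update_nil_left] using h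

lemma getD_grouped (issues : List (String × String)) (cat : String) :
    (issues.foldl (fun d p => d.modify p.1 [] (· ++ [p.2]))
      (PySem.Dict.empty : PySem.Dict String (List String))).getD cat []
      = (issues.filter (fun p => p.1 == cat)).map Prod.snd := by
  have h := PySem.Dict.getD_foldl_modify_append issues
      (PySem.Dict.empty : PySem.Dict String (List String)) cat
  simpa using h

lemma contains_grouped (issues : List (String × String)) (cat : String) :
    (issues.foldl (fun d p => d.modify p.1 [] (· ++ [p.2]))
      (PySem.Dict.empty : PySem.Dict String (List String))).contains cat
      = !((issues.filter (fun p => p.1 == cat)).map Prod.snd).isEmpty := by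
  rw [PySem.Dict.contains_eq_decide_mem_keys, keys_grouped]
  by_cases hmem : cat ∈ issues.map Prod.fst
  · have hne : ¬ (issues.filter (fun p => p.1 == cat)) = [] := by
      simp only [List.mem_map] at hmem
      obtain ⟨p, hp, rfl⟩ := hmem
      simp only [List.filter_eq_nil_iff]
      push Not
      exact ⟨p, hp, by simp⟩
    simp [PySem.Set.mem_ofList, hmem, hne]
  · have he : (issues.filter (fun p => p.1 == cat)) = [] := by
      simp only [List.filter_eq_nil_iff]
      intro p hp hpc
      exact hmem (List.mem_map.mpr ⟨p, hp, by simpa using hpc⟩)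
    simp [PySem.Set.mem_ofList, hmem, he]

-- a string cut after the '\n': pulling the separator out of a literal
lemma str_glue (o s : String) (pre suf : String) (h : pre.toList = '\n' :: suf.toList) :
    o ++ pre ++ s = o ++ "\n" ++ (suf ++ s) := by
  apply String.toList_inj.mp
  simp [h]

-- A's lines list = header :: the per-category blocks, flattened
lemma a_lines (issues : List (String × String)) (header : List String) :
    allCategories.foldl (fun lines cat =>
      if (issues.foldl (fun d p => d.modify p.1 [] (· ++ [p.2]))
            (PySem.Dict.empty : PySem.Dict String (List String))).contains cat then
        let items := (issues.foldl (fun d p => d.modify p.1 [] (· ++ [p.2]))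
            (PySem.Dict.empty : PySem.Dict String (List String))).getD cat []
        let lines := lines ++ ["  " ++ cat ++ " (" ++ PySem.Int.toStr (items.length : Int) ++ "):"]
        items.foldl (fun lines item => lines ++ ["    - " ++ item]) lines
      else lines) header
    = header ++ allCategories.flatMap (lineFor issues) := by
  rw [← foldl_append_flat]
  apply PySem.List.foldl_congr_mem
  intro ls cat _
  rw [contains_grouped, getD_grouped, lineFor]
  by_cases he : ((issues.filter (fun p => p.1 == cat)).map Prod.snd).isEmpty
  · simp [he]
  · simp only [he, Bool.not_false, if_true, Bool.false_eq_true]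
    rw [foldl_app_singleton]
    simp

-- B's fold step = folding the per-category block into the accumulator
lemma b_step (issues : List (String × String)) (out cat : String) :
    (let details := (issues.filter (fun p => p.1 == cat)).map Prod.snd
     if details.isEmpty then out
     else details.foldl (fun o d => o ++ "\n    - " ++ d)
       (out ++ "\n  " ++ cat ++ " (" ++ PySem.Int.toStr (details.length : Int) ++ "):"))
    = (lineFor issues cat).foldl (fun o s => o ++ "\n" ++ s) out := by
  rw [lineFor]
  by_cases he : ((issues.filter (fun p => p.1 == cat)).map Prod.snd).isEmpty
  · simp [he]
  · simp only [he, if_neg, Bool.false_eq_true, not_false_iff, List.foldl_cons, List.foldl_map]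
    have hh : out ++ "\n  " ++ cat ++ " (" ++ PySem.Int.toStr (((issues.filter (fun p => p.1 == cat)).map Prod.snd).length : Int) ++ "):"
        = out ++ "\n" ++ ("  " ++ cat ++ " (" ++ PySem.Int.toStr (((issues.filter (fun p => p.1 == cat)).map Prod.snd).length : Int) ++ "):") := by
      apply String.toList_inj.mp
      simp
    rw [hh]
    apply PySem.List.foldl_congr_mem
    intro o d _
    exact str_glue o d.2 "\n    - " "    - " rfl

-- ===== VERDICT (by name: the statement is the Claim_ definition above) =====
theorem format_grouped_py_spec : Claim_equal_format_grouped_py := by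
  intro issues _
  unfold Spec_format_grouped_py format_grouped_py format_grouped_py_alt
  simp only []
  have hsize : (issues.foldl (fun d p => d.modify p.1 [] (· ++ [p.2]))
      (PySem.Dict.empty : PySem.Dict String (List String))).size
      = (PySem.Set.ofList (issues.map Prod.fst)).length := by
    have : ∀ (d : PySem.Dict String (List String)), d.size = d.keys.length := by
      intro d; simp [PySem.Dict.size, PySem.Dict.keys]
    rw [this, keys_grouped]
  rw [hsize, a_lines]
  have hB : ∀ (hd : String),
      allCategories.foldl (fun out cat =>
        let details := (issues.filter (fun p => p.1 == cat)).map Prod.snd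
        if details.isEmpty then out
        else details.foldl (fun o d => o ++ "\n    - " ++ d)
          (out ++ "\n  " ++ cat ++ " (" ++ PySem.Int.toStr (details.length : Int) ++ "):")) hd
      = (allCategories.flatMap (lineFor issues)).foldl (fun o s => o ++ "\n" ++ s) hd := by
    intro hd
    rw [List.foldl_flatMap]
    apply PySem.List.foldl_congr_mem
    intro o cat _
    exact b_step issues o cat
  rw [hB]
  exact str_join_cons _ _
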